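-- pv_equiv track=rewrite | github.com/Abir784/SentimentAnalysisOfAIAgents | src/collectors/moltbook_scraper.py | _trim_at_comments_section
-- ===== SOURCE A (Python) =====
-- from typing import Any, Dict, List, Optional
--
-- def _trim_at_comments_section(text: str) -> str:
--     markers = ["## Comments", "Comments (", "## CONTINUE READING"]
--     min_idx: Optional[int] = None
--     for marker in markers:
--         i = text.find(marker)
--         if i >= 0 and (min_idx is None or i < min_idx):
--             min_idx = i
--     if min_idx is not None:
--         return text[:min_idx].strip()
--     return text.strip()
-- ===== SOURCE B (Python) =====
-- def _trim_at_comments_section(text: str) -> str: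
--     markers = ("## Comments", "Comments (", "## CONTINUE READING")
--     for i in range(len(text)):
--         if any(text.startswith(m, i) for m in markers):
--             return text[:i].strip()
--     return text.strip()
-- ===== Notes on version B (the rewrite author's own statement) =====
-- stated objective: alternative
-- what changed: Replaces three separate str.find passes plus a running minimum with a single left-to-right scan that stops at the first position where any marker starts.
import Mathlib
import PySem

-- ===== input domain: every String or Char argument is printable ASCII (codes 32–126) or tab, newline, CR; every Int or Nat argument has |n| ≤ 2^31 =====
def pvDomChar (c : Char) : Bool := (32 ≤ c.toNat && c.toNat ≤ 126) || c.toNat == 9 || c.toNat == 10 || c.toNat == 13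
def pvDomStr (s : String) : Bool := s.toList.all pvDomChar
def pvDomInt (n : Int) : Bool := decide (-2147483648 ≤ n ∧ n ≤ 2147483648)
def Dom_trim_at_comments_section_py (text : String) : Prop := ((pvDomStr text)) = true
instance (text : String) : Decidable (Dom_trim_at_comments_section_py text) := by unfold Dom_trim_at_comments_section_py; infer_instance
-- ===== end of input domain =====

-- B replaces A's three separate find passes plus a running minimum by a single left-to-right
-- scan stopping at the first position where any marker starts (alternative decomposition).


-- ===== PORT A =====
-- one step of A's 'for marker in markers' loop updating min_idx
def pvStepA (text : String) (acc : Option Int) (marker : String) : Option Int :=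
  match acc with
  | none =>
    if 0 ≤ PySem.Str.find text marker then some (PySem.Str.find text marker) else none
  | some j =>
    if 0 ≤ PySem.Str.find text marker ∧ PySem.Str.find text marker < j
    then some (PySem.Str.find text marker) else some j

def trim_at_comments_section_py (text : String) : String :=
  match (["## Comments", "Comments (", "## CONTINUE READING"] : List String).foldl
          (pvStepA text) none with
  | some j => PySem.Str.strip (PySem.Str.slice text none (some j))
  | none => PySem.Str.strip text

-- ===== PORT B =====
-- B's 'for i in range(len(text))' loop: walk the suffixes, return the first index where some
-- marker starts (text.startswith(m, i) is 'm is a prefix of the suffix at i')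
def pvAltScan (markers : List (List Char)) : List Char → Nat → Option Nat
  | [], _ => none
  | u@(_ :: rest), i =>
    if markers.any (fun m => PySem.Chars.startswith u m) then some i
    else pvAltScan markers rest (i + 1)

def trim_at_comments_section_py_alt (text : String) : String :=
  match pvAltScan
      [("## Comments").toList, ("Comments (").toList, ("## CONTINUE READING").toList]
      text.toList 0 with
  | some i => PySem.Str.strip (PySem.Str.slice text none (some (i : Int)))
  | none => PySem.Str.strip text

-- ===== PRECONDITION & SPEC =====
def Spec_trim_at_comments_section_py (text : String) (out : String) : Prop := out = trim_at_comments_section_py_alt text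
instance (text : String) (out : String) : Decidable (Spec_trim_at_comments_section_py text out) := by unfold Spec_trim_at_comments_section_py; infer_instance

-- ===== CLAIM (what is proved, stated in full; the proofs are below) =====
def Claim_equal_trim_at_comments_section_py : Prop := ∀ (text : String), Dom_trim_at_comments_section_py text → Spec_trim_at_comments_section_py text (trim_at_comments_section_py text)

-- ===== LEMMAS AND PROOFS =====

-- A's fold, ended in `some j`, yields a nonnegative j that is a find-value of some marker and
-- a lower bound on every marker's nonnegative find-value (generalized over the accumulator).
theorem pvFoldA_some (text : String) (ms : List String) :
    ∀ (acc : Option Int) (j : Int),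
      (∀ i, acc = some i → 0 ≤ i) →
      ms.foldl (pvStepA text) acc = some j →
      0 ≤ j ∧
      (acc = some j ∨ ∃ m ∈ ms, PySem.Str.find text m = j) ∧
      (∀ m ∈ ms, PySem.Str.find text m < 0 ∨ j ≤ PySem.Str.find text m) ∧
      (∀ i, acc = some i → j ≤ i) := by
  induction ms with
  | nil =>
    intro acc j hacc h
    simp only [List.foldl_nil] at h
    subst h
    refine ⟨hacc j rfl, Or.inl rfl, by simp, ?_⟩
    intro i hi
    injection hi with hi
    omega
  | cons m ms ih =>
    intro acc j hacc h
    rw [List.foldl_cons] at h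
    have hstep : ∀ i, pvStepA text acc m = some i → 0 ≤ i := by
      intro i hi
      cases acc with
      | none =>
        simp only [pvStepA] at hi
        split at hi
        · rename_i hc; injection hi with hi; omega
        · cases hi
      | some a =>
        simp only [pvStepA] at hi
        split at hi
        · rename_i hc; injection hi with hi; omega
        · injection hi with hi; have := hacc a rfl; omega
    obtain ⟨hj, hsrc, hlb, hle⟩ := ih (pvStepA text acc m) j hstep h
    refine ⟨hj, ?_, ?_, ?_⟩
    · -- source of j
      rcases hsrc with hsrc | ⟨m', hm', hf⟩
      · cases acc with
        | none =>
          simp only [pvStepA] at hsrc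
          split at hsrc
          · injection hsrc with hs; exact Or.inr ⟨m, List.mem_cons_self, hs⟩
          · cases hsrc
        | some a =>
          simp only [pvStepA] at hsrc
          split at hsrc
          · injection hsrc with hs; exact Or.inr ⟨m, List.mem_cons_self, hs⟩
          · injection hsrc with hs; exact Or.inl (by rw [hs])
      · exact Or.inr ⟨m', List.mem_cons_of_mem _ hm', hf⟩
    · -- lower bound for every marker of m :: ms
      intro m' hm'
      rcases List.mem_cons.mp hm' with rfl | hm''
      · by_cases hf : 0 ≤ PySem.Str.find text m'
        · right
          cases acc with
          | none =>
            have hs : pvStepA text none m' = some (PySem.Str.find text m') := by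
              simp only [pvStepA]; rw [if_pos hf]
            exact hle _ hs
          | some a =>
            by_cases hc : 0 ≤ PySem.Str.find text m' ∧ PySem.Str.find text m' < a
            · have hs : pvStepA text (some a) m' = some (PySem.Str.find text m') := by
                simp only [pvStepA]; rw [if_pos hc]
              exact hle _ hs
            · have hs : pvStepA text (some a) m' = some a := by
                simp only [pvStepA]; rw [if_neg hc]
              have hja := hle a hs
              omega
        · left; omega
      · exact hlb m' hm''
    · -- j ≤ anything already in acc
      intro i hi
      subst hi
      by_cases hc : 0 ≤ PySem.Str.find text m ∧ PySem.Str.find text m < i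
      · have hs : pvStepA text (some i) m = some (PySem.Str.find text m) := by
          simp only [pvStepA]; rw [if_pos hc]
        have := hle _ hs
        omega
      · have hs : pvStepA text (some i) m = some i := by
          simp only [pvStepA]; rw [if_neg hc]
        exact hle i hs

-- A's fold ended in `none`: no marker occurs (every find is negative).
theorem pvFoldA_none (text : String) (ms : List String) :
    ∀ (acc : Option Int),
      ms.foldl (pvStepA text) acc = none →
      acc = none ∧ ∀ m ∈ ms, PySem.Str.find text m < 0 := by
  induction ms with
  | nil => intro acc h; simp only [List.foldl_nil] at h; exact ⟨h, by simp⟩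
  | cons m ms ih =>
    intro acc h
    rw [List.foldl_cons] at h
    obtain ⟨hstep, hall⟩ := ih _ h
    cases acc with
    | none =>
      refine ⟨rfl, ?_⟩
      intro m' hm'
      rcases List.mem_cons.mp hm' with rfl | hm''
      · simp only [pvStepA] at hstep
        split at hstep
        · cases hstep
        · rename_i hc; omega
      · exact hall m' hm''
    | some a =>
      simp only [pvStepA] at hstep
      split at hstep <;> cases hstep

-- B's scan returns `none` when no marker starts at any position of the suffix.
theorem pvAltScan_eq_none (ms : List (List Char)) (u : List Char) (i : Nat)
    (h : ∀ k, (ms.any fun m => PySem.Chars.startswith (u.drop k) m) = false) :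
    pvAltScan ms u i = none := by
  induction u generalizing i with
  | nil => rfl
  | cons c rest ih =>
    unfold pvAltScan
    have hh : (ms.any fun m => PySem.Chars.startswith (c :: rest) m) = false := by
      have := h 0; rwa [List.drop_zero] at this
    rw [hh]
    simp only [Bool.false_eq_true, if_false]
    exact ih (i + 1) (fun k => by have := h (k + 1); rwa [List.drop_succ_cons] at this)

-- B's scan returns `i + d` when the first position of the suffix where a marker starts is d
-- (h0: no marker is the empty string).
theorem pvAltScan_eq_some (ms : List (List Char))
    (h0 : (ms.any fun m => PySem.Chars.startswith [] m) = false) (u : List Char) :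
    ∀ (i d : Nat),
      (ms.any fun m => PySem.Chars.startswith (u.drop d) m) = true →
      (∀ k < d, (ms.any fun m => PySem.Chars.startswith (u.drop k) m) = false) →
      pvAltScan ms u i = some (i + d) := by
  induction u with
  | nil =>
    intro i d hd hmin
    rw [List.drop_nil, h0] at hd
    exact Bool.noConfusion hd
  | cons c rest ih =>
    intro i d hd hmin
    cases d with
    | zero =>
      unfold pvAltScan
      rw [List.drop_zero] at hd
      rw [hd]
      simp
    | succ n =>
      unfold pvAltScan
      have hh : (ms.any fun m => PySem.Chars.startswith (c :: rest) m) = false := by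
        have := hmin 0 (Nat.succ_pos n); rwa [List.drop_zero] at this
      rw [hh]
      simp only [Bool.false_eq_true, if_false]
      have hrec := ih (i + 1) n (by rwa [List.drop_succ_cons] at hd)
        (fun k hk => by have := hmin (k + 1) (by omega); rwa [List.drop_succ_cons] at this)
      rw [hrec]
      congr 1
      omega
-- a prefix of the suffix at k forces find to be defined and at most k
theorem pvFind_le_of_prefix (s m : List Char) (k : Nat) (h : m <+: s.drop k) :
    0 ≤ PySem.Chars.find s m ∧ (PySem.Chars.find s m).toNat ≤ k := by
  have hin : PySem.Chars.isIn m s = true :=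
    (PySem.Chars.exists_prefix_drop_iff_isIn m s).mp ⟨k, h⟩
  have hne : PySem.Chars.find s m ≠ -1 := by
    intro hc
    rw [PySem.Chars.find_eq_neg_one_iff] at hc
    exact hc ((PySem.Chars.isIn_iff_infix m s).mp hin)
  have hge : 0 ≤ PySem.Chars.find s m := by
    have := PySem.Chars.neg_one_le_find s m; omega
  refine ⟨hge, ?_⟩
  by_contra hk
  exact (PySem.Chars.find_spec hge).2 k (by omega) h

-- ===== VERDICT (by name: the statement is the Claim_ definition above) =====
theorem trim_at_comments_section_py_spec : Claim_equal_trim_at_comments_section_py := by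
  intro text _
  unfold Spec_trim_at_comments_section_py trim_at_comments_section_py trim_at_comments_section_py_alt
  rw [show ([("## Comments").toList, ("Comments (").toList, ("## CONTINUE READING").toList] :
        List (List Char)) =
      (["## Comments", "Comments (", "## CONTINUE READING"] : List String).map String.toList
    from rfl]
  cases hfold : (["## Comments", "Comments (", "## CONTINUE READING"] : List String).foldl
      (pvStepA text) none with
  | none =>
    obtain ⟨-, hall⟩ := pvFoldA_none text _ none hfold
    have hscan : pvAltScan
        ((["## Comments", "Comments (", "## CONTINUE READING"] : List String).map String.toList)
        text.toList 0 = none := by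
      apply pvAltScan_eq_none
      intro k
      rw [List.any_eq_false]
      intro m hm
      rw [List.mem_map] at hm
      obtain ⟨t, ht, rfl⟩ := hm
      intro hc
      rw [PySem.Chars.startswith_iff] at hc
      obtain ⟨hge, -⟩ := pvFind_le_of_prefix text.toList t.toList k hc
      have hlt := hall t ht
      rw [PySem.Str.find_eq] at hlt
      omega
    rw [hscan]
  | some j =>
    obtain ⟨hj, hsrc, hlb, -⟩ := pvFoldA_some text _ none j (by simp) hfold
    rcases hsrc with hsrc | ⟨m0, hm0, hf0⟩
    · cases hsrc
    rw [PySem.Str.find_eq] at hf0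
    have hge0 : 0 ≤ PySem.Chars.find text.toList m0.toList := by omega
    have hpre : m0.toList <+: text.toList.drop j.toNat := by
      have := (PySem.Chars.find_spec hge0).1
      rwa [hf0] at this
    have hscan : pvAltScan
        ((["## Comments", "Comments (", "## CONTINUE READING"] : List String).map String.toList)
        text.toList 0 = some (0 + j.toNat) := by
      apply pvAltScan_eq_some _ (by decide)
      · rw [List.any_eq_true]
        refine ⟨m0.toList, List.mem_map.mpr ⟨m0, hm0, rfl⟩, ?_⟩
        rw [PySem.Chars.startswith_iff]
        exact hpre
      · intro k hk
        rw [List.any_eq_false]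
        intro m hm
        rw [List.mem_map] at hm
        obtain ⟨t, ht, rfl⟩ := hm
        intro hc
        rw [PySem.Chars.startswith_iff] at hc
        obtain ⟨hge, hle⟩ := pvFind_le_of_prefix text.toList t.toList k hc
        have hb := hlb t ht
        rw [PySem.Str.find_eq] at hb
        omega
    rw [hscan]
    simp only [Nat.zero_add]
    rw [Int.toNat_of_nonneg hj]
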